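-- pv_equiv track=rewrite | github.com/lukelookluck/algorithm_exam | 프로그래머스/일반/월간코드 시즌 1/문자열의 아름다움 X.py | solution
-- ===== SOURCE A (Python) =====
-- def solution(s):
--     answer = 0
--     s_len = len(s)
--
--     for i in range(s_len):
--         for j in range(i, s_len):
--             word = s[i:j+1]
--             w_len = len(word)
--             idx = 0
--             my_max = 0
--             while idx != w_len - 1:
--                 if my_max > w_len - idx - 1:
--                     break
--
--                 for r in range(w_len, idx, -1):
--                     if word[idx] != word[r-1] and my_max < r - idx - 1:
--                         my_max = r - idx - 1
--
--                 idx += 1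
--             answer += my_max
--
--     return answer
-- ===== SOURCE B (Python) =====
-- def solution(s):
--     n = len(s)
--     ans = 0
--     for i in range(n):
--         nd = -1        # first index > i with s[nd] != s[i]
--         best = 0       # beauty of s[i..j] so far
--         for j in range(i + 1, n):
--             if s[j] != s[i]:
--                 if nd == -1:
--                     nd = j
--                 cand = j - i
--             elif nd != -1:
--                 cand = j - nd
--             else:
--                 cand = 0
--             if cand > best:
--                 best = cand
--             ans += best
--     return ans
-- ===== Notes on version B (the rewrite author's own statement) =====
-- stated objective: faster
-- what changed: Instead of recomputing each substring's max differing-pair distance from scratch with a pruned double scan, B sweeps each left endpoint once, maintaining the first differing index and the running beauty incrementally as the right endpoint grows.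
import Mathlib
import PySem

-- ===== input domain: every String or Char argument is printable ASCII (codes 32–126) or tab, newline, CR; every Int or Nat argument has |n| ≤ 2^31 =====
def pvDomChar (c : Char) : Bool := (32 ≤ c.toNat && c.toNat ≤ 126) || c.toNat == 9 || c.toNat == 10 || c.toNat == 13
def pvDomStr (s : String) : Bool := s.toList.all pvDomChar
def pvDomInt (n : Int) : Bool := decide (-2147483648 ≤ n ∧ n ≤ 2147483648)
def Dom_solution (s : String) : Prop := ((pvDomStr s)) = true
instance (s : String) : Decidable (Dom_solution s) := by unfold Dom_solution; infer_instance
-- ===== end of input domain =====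

-- B replaces A's per-substring pruned double scan by one incremental sweep per left
-- endpoint (objective: faster).

-- ===== PORT A =====
-- inner 'for r in range(w_len, idx, -1)' loop of A (string ops ported via toList; exact)
def aInner (word : List Char) (wLen idx m0 : Int) : Int :=
  (PySem.List.pyRange wLen idx (-1)).foldl
    (fun m r => if PySem.List.pyGet? word idx ≠ PySem.List.pyGet? word (r - 1) ∧ m < r - idx - 1
                then r - idx - 1 else m) m0

-- A's 'while idx != w_len - 1' loop; fuel only makes the recursion total (the loop runs
-- at most wLen - 1 times, so fuel = wLen.toNat is never exhausted on A's actual calls)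
def aWhile (word : List Char) (wLen : Int) : Nat → Int → Int → Int
  | 0, _, m => m
  | fuel + 1, idx, m =>
    if idx = wLen - 1 then m
    else if m > wLen - idx - 1 then m
    else aWhile word wLen fuel (idx + 1) (aInner word wLen idx m)

def solution (s : String) : Int :=
  let cs := s.toList
  let sLen : Int := (cs.length : Int)
  (PySem.List.pyRange 0 sLen 1).foldl (fun answer i =>
    (PySem.List.pyRange i sLen 1).foldl (fun answer j =>
      let word := PySem.List.slice cs (some i) (some (j + 1))
      let wLen : Int := (word.length : Int)
      answer + aWhile word wLen wLen.toNat 0 0) answer) 0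

-- ===== PORT B =====
-- body of B's inner loop; state (nd, best, ans)
def bBody (cs : List Char) (i : Int) (st : Int × Int × Int) (j : Int) : Int × Int × Int :=
  let t : Int × Int :=
    if PySem.List.pyGet? cs j ≠ PySem.List.pyGet? cs i then
      (if st.1 = -1 then j else st.1, j - i)
    else if st.1 ≠ -1 then (st.1, j - st.1)
    else (st.1, 0)
  let best := if t.2 > st.2.1 then t.2 else st.2.1
  (t.1, best, st.2.2 + best)

def solution_alt (s : String) : Int :=
  let cs := s.toList
  let n : Int := (cs.length : Int)
  (PySem.List.pyRange 0 n 1).foldl (fun ans i =>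
    ((PySem.List.pyRange (i + 1) n 1).foldl (bBody cs i) (-1, 0, ans)).2.2) 0

-- ===== PRECONDITION & SPEC =====
def Spec_solution (s : String) (out : Int) : Prop := out = solution_alt s
instance (s : String) (out : Int) : Decidable (Spec_solution s out) := by unfold Spec_solution; infer_instance

-- ===== CLAIM (what is proved, stated in full; the proofs are below) =====
def Claim_equal_solution : Prop := ∀ (s : String), Dom_solution s → Spec_solution s (solution s)

-- ===== LEMMAS AND PROOFS =====

-- "m is the beauty of the window cs[i..j]": max distance between differing chars, 0 if none
def MS (cs : List Char) (i j m : Int) : Prop :=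
  0 ≤ m ∧
  (∀ p q : Int, i ≤ p → p < q → q ≤ j → PySem.List.pyGet? cs p ≠ PySem.List.pyGet? cs q → q - p ≤ m) ∧
  (m = 0 ∨ ∃ p q : Int, i ≤ p ∧ p < q ∧ q ≤ j ∧ PySem.List.pyGet? cs p ≠ PySem.List.pyGet? cs q ∧ m = q - p)

theorem MS_unique {cs : List Char} {i j m m' : Int} (h : MS cs i j m) (h' : MS cs i j m') :
    m = m' := by
  obtain ⟨h0, hb, hw⟩ := h
  obtain ⟨h0', hb', hw'⟩ := h'
  have hle : m ≤ m' := by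
    rcases hw with rfl | ⟨p, q, hp, hpq, hq, hne, rfl⟩
    · exact h0'
    · exact hb' p q hp hpq hq hne
  have hge : m' ≤ m := by
    rcases hw' with rfl | ⟨p, q, hp, hpq, hq, hne, rfl⟩
    · exact h0
    · exact hb p q hp hpq hq hne
  omega

-- generic characterisation of A's conditional-max fold
theorem condmax (P : Int → Prop) [DecidablePred P] (g : Int → Int) :
    ∀ (l : List Int) (m0 : Int),
      m0 ≤ l.foldl (fun m r => if P r ∧ m < g r then g r else m) m0 ∧
      (l.foldl (fun m r => if P r ∧ m < g r then g r else m) m0 = m0 ∨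
        ∃ r ∈ l, P r ∧ l.foldl (fun m r => if P r ∧ m < g r then g r else m) m0 = g r) ∧
      (∀ r ∈ l, P r → g r ≤ l.foldl (fun m r => if P r ∧ m < g r then g r else m) m0) := by
  intro l
  induction l with
  | nil =>
    intro m0
    refine ⟨le_refl _, Or.inl rfl, ?_⟩
    intro r hr
    cases hr
  | cons a t ih =>
    intro m0
    simp only [List.foldl_cons]
    set m1 := if P a ∧ m0 < g a then g a else m0 with hm1
    have h01 : m0 ≤ m1 := by
      rw [hm1]
      split_ifs with h
      · exact le_of_lt h.2
      · exact le_refl _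
    obtain ⟨ih1, ih2, ih3⟩ := ih m1
    refine ⟨le_trans h01 ih1, ?_, ?_⟩
    · rcases ih2 with heq | ⟨r, hr, hPr, hfr⟩
      · rw [heq, hm1]
        split_ifs with h
        · exact Or.inr ⟨a, List.mem_cons_self, h.1, rfl⟩
        · exact Or.inl rfl
      · exact Or.inr ⟨r, List.mem_cons_of_mem _ hr, hPr, hfr⟩
    · intro r hr hPr
      rcases List.mem_cons.mp hr with rfl | hr'
      · have hm : g r ≤ m1 := by
          rw [hm1]
          split_ifs with h
          · exact le_refl _
          · rw [not_and_or] at h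
            rcases h with h | h
            · exact absurd hPr h
            · omega
        exact le_trans hm ih1
      · exact ih3 r hr' hPr

-- characterisation of aInner: it maxes m0 with the distances from idx to later differing chars
theorem aInner_spec (word : List Char) (idx m0 L : Int) :
    m0 ≤ aInner word L idx m0 ∧
    (aInner word L idx m0 = m0 ∨
      ∃ q : Int, idx < q ∧ q ≤ L - 1 ∧
        PySem.List.pyGet? word idx ≠ PySem.List.pyGet? word q ∧ aInner word L idx m0 = q - idx) ∧
    (∀ q : Int, idx < q → q ≤ L - 1 →
      PySem.List.pyGet? word idx ≠ PySem.List.pyGet? word q → q - idx ≤ aInner word L idx m0) := by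
  obtain ⟨h1, h2, h3⟩ := condmax
    (fun r => PySem.List.pyGet? word idx ≠ PySem.List.pyGet? word (r - 1))
    (fun r => r - idx - 1) (PySem.List.pyRange L idx (-1)) m0
  refine ⟨h1, ?_, ?_⟩
  · rcases h2 with heq | ⟨r, hr, hPr, hfr⟩
    · exact Or.inl heq
    · rw [PySem.List.mem_pyRange_neg_one] at hr
      have hfr' : aInner word L idx m0 = r - idx - 1 := hfr
      refine Or.inr ⟨r - 1, ?_, by omega, hPr, by omega⟩
      by_contra hc
      have hri : r - 1 = idx := by omega
      rw [hri] at hPr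
      exact hPr rfl
  · intro q hq1 hq2 hne
    have hP : PySem.List.pyGet? word idx ≠ PySem.List.pyGet? word (q + 1 - 1) := by
      have h : q + 1 - 1 = q := by omega
      rw [h]; exact hne
    have h4 : q + 1 - idx - 1 ≤ aInner word L idx m0 :=
      h3 (q + 1) (by rw [PySem.List.mem_pyRange_neg_one]; omega) hP
    omega

-- invariant of A's while loop: m is the beauty restricted to pairs with left index < idx
def WInv (word : List Char) (L idx m : Int) : Prop :=
  0 ≤ m ∧
  (∀ p q : Int, 0 ≤ p → p < idx → p < q → q ≤ L - 1 →
    PySem.List.pyGet? word p ≠ PySem.List.pyGet? word q → q - p ≤ m) ∧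
  (m = 0 ∨ ∃ p q : Int, 0 ≤ p ∧ p < q ∧ q ≤ L - 1 ∧
    PySem.List.pyGet? word p ≠ PySem.List.pyGet? word q ∧ m = q - p)

theorem aWhile_MS (word : List Char) (L : Int) :
    ∀ (fuel : Nat) (idx m : Int), 0 ≤ idx → idx ≤ L - 1 → (L - 1 - idx).toNat ≤ fuel →
      WInv word L idx m → MS word 0 (L - 1) (aWhile word L fuel idx m) := by
  intro fuel
  induction fuel with
  | zero =>
    intro idx m hidx0 hidxL hfuel hInv
    obtain ⟨h0, hb, hw⟩ := hInv
    have hidx : idx = L - 1 := by omega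
    subst hidx
    exact ⟨h0, fun p q hp hpq hq hne => hb p q hp (by omega) hpq hq hne, hw⟩
  | succ fuel ih =>
    intro idx m hidx0 hidxL hfuel hInv
    obtain ⟨h0, hb, hw⟩ := hInv
    rw [aWhile]
    split_ifs with hstop hbig
    · subst hstop
      exact ⟨h0, fun p q hp hpq hq hne => hb p q hp (by omega) hpq hq hne, hw⟩
    · refine ⟨h0, ?_, hw⟩
      intro p q hp hpq hq hne
      by_cases hpi : p < idx
      · exact hb p q hp hpi hpq hq hne
      · omega
    · have hidxlt : idx < L - 1 := lt_of_le_of_ne hidxL hstop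
      have ha1 : 0 ≤ idx + 1 := by omega
      have ha2 : idx + 1 ≤ L - 1 := by omega
      have ha3 : (L - 1 - (idx + 1)).toNat ≤ fuel := by omega
      obtain ⟨i1, i2, i3⟩ := aInner_spec word idx m L
      refine ih (idx + 1) (aInner word L idx m) ha1 ha2 ha3 ?_
      refine ⟨le_trans h0 i1, ?_, ?_⟩
      · intro p q hp hpi hpq hq hne
        by_cases hpidx : p < idx
        · exact le_trans (hb p q hp hpidx hpq hq hne) i1
        · have hpe : p = idx := by omega
          subst hpe
          exact i3 q hpq hq hne
      · rcases i2 with heq | ⟨q, hq1, hq2, hne, heq⟩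
        · rw [heq]
          rcases hw with rfl | ⟨p, q, hp, hpq, hq, hne, hm⟩
          · exact Or.inl rfl
          · exact Or.inr ⟨p, q, hp, hpq, hq, hne, hm⟩
        · exact Or.inr ⟨idx, q, hidx0, hq1, hq2, hne, heq⟩

-- A's per-substring value, as the port computes it
def Aval (cs : List Char) (i j : Int) : Int :=
  let word := PySem.List.slice cs (some i) (some (j + 1))
  let wLen : Int := (word.length : Int)
  aWhile word wLen wLen.toNat 0 0

theorem slice_len (cs : List Char) (i j : Int) (hi : 0 ≤ i) (hij : i ≤ j)
    (hj : j < (cs.length : Int)) :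
    ((PySem.List.slice cs (some i) (some (j + 1))).length : Int) = j + 1 - i := by
  rw [PySem.List.slice_toNat cs hi (by omega)]
  simp only [List.length_take, List.length_drop]
  omega

theorem slice_get (cs : List Char) (i j t : Int) (hi : 0 ≤ i) (hij : i ≤ j) (ht : 0 ≤ t)
    (hlt : t < ((PySem.List.slice cs (some i) (some (j + 1))).length : Int)) :
    PySem.List.pyGet? (PySem.List.slice cs (some i) (some (j + 1))) t
      = PySem.List.pyGet? cs (i + t) := by
  have hj1 : (0:Int) ≤ j + 1 := by omega
  rw [PySem.List.slice_toNat cs hi hj1] at hlt ⊢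
  simp only [List.length_take, List.length_drop] at hlt
  rw [PySem.List.pyGet?_of_nonneg _ ht, PySem.List.pyGet?_of_nonneg _ (by omega : (0:Int) ≤ i + t)]
  rw [List.getElem?_take_of_lt (by omega), List.getElem?_drop]
  congr 1
  omega

theorem Aval_MS (cs : List Char) (i j : Int) (hi : 0 ≤ i) (hij : i ≤ j)
    (hj : j < (cs.length : Int)) : MS cs i j (Aval cs i j) := by
  set word := PySem.List.slice cs (some i) (some (j + 1)) with hword
  have hL : ((word.length : Int)) = j + 1 - i := slice_len cs i j hi hij hj
  have hget : ∀ t : Int, 0 ≤ t → t < (word.length : Int) →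
      PySem.List.pyGet? word t = PySem.List.pyGet? cs (i + t) :=
    fun t h1 h2 => slice_get cs i j t hi hij h1 h2
  have hmain : MS word 0 ((word.length : Int) - 1) (Aval cs i j) := by
    refine aWhile_MS word ((word.length : Int)) ((word.length : Int)).toNat 0 0
      (le_refl 0) (by omega) (by omega) ?_
    refine ⟨le_refl 0, ?_, Or.inl rfl⟩
    intro p q hp hpi hpq hq hne
    omega
  obtain ⟨h0, hb, hw⟩ := hmain
  refine ⟨h0, ?_, ?_⟩
  · intro p q hp hpq hq hne
    have h1 := hget (p - i) (by omega) (by omega)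
    have h2 := hget (q - i) (by omega) (by omega)
    have h3 := hb (p - i) (q - i) (by omega) (by omega) (by omega)
      (by rw [h1, h2]; simpa [show i + (p - i) = p by ring, show i + (q - i) = q by ring] using hne)
    omega
  · rcases hw with heq | ⟨p, q, hp, hpq, hq, hne, hm⟩
    · exact Or.inl heq
    · refine Or.inr ⟨i + p, i + q, by omega, by omega, by omega, ?_, by omega⟩
      rw [← hget p hp (by omega), ← hget q (by omega) (by omega)]
      exact hne

-- invariant on B's nd: -1 and no differing char yet, or the first index past i differing from cs[i]
def NdInv (cs : List Char) (i j nd : Int) : Prop :=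
  (nd = -1 ∧ ∀ k : Int, i < k → k ≤ j → PySem.List.pyGet? cs k = PySem.List.pyGet? cs i) ∨
  (i < nd ∧ nd ≤ j ∧ PySem.List.pyGet? cs nd ≠ PySem.List.pyGet? cs i ∧
    ∀ k : Int, i < k → k < nd → PySem.List.pyGet? cs k = PySem.List.pyGet? cs i)

-- one step of B's running beauty: take the max with the best new pair ending at j
theorem MS_step (cs : List Char) (i j best cand : Int) (hij : i < j)
    (hms : MS cs i (j - 1) best)
    (hub : ∀ p : Int, i ≤ p → p < j → PySem.List.pyGet? cs p ≠ PySem.List.pyGet? cs j → j - p ≤ cand)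
    (hwit : cand ≤ best ∨ ∃ p : Int, i ≤ p ∧ p < j ∧
      PySem.List.pyGet? cs p ≠ PySem.List.pyGet? cs j ∧ cand = j - p) :
    MS cs i j (if cand > best then cand else best) := by
  obtain ⟨h0, hb, hw⟩ := hms
  by_cases hc : cand > best
  · rw [if_pos hc]
    refine ⟨by omega, ?_, ?_⟩
    · intro p q hp hpq hq hne
      by_cases hqj : q = j
      · subst hqj
        exact hub p hp hpq hne
      · have := hb p q hp hpq (by omega) hne
        omega
    · rcases hwit with hle | ⟨p, hp, hpj, hne, hceq⟩
      · exact absurd hle (by omega)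
      · exact Or.inr ⟨p, j, hp, hpj, le_refl j, hne, hceq⟩
  · rw [if_neg hc]
    refine ⟨h0, ?_, ?_⟩
    · intro p q hp hpq hq hne
      by_cases hqj : q = j
      · subst hqj
        have := hub p hp hpq hne
        omega
      · exact hb p q hp hpq (by omega) hne
    · rcases hw with h | ⟨p, q, hp, hpq, hq, hne, hm⟩
      · exact Or.inl h
      · exact Or.inr ⟨p, q, hp, hpq, by omega, hne, hm⟩

theorem bBody_spec (cs : List Char) (i j nd best ans : Int) (hi : 0 ≤ i) (hij : i < j)
    (hnd : NdInv cs i (j - 1) nd) (hms : MS cs i (j - 1) best) :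
    NdInv cs i j (bBody cs i (nd, best, ans) j).1 ∧
    MS cs i j (bBody cs i (nd, best, ans) j).2.1 ∧
    (bBody cs i (nd, best, ans) j).2.2 = ans + (bBody cs i (nd, best, ans) j).2.1 := by
  have h0 : 0 ≤ best := hms.1
  by_cases hdiff : PySem.List.pyGet? cs j = PySem.List.pyGet? cs i
  · by_cases hnd1 : nd = -1
    · -- equal char at j, no differing char seen yet
      have hng : ¬ ((0:Int) > best) := by omega
      have hbb : bBody cs i (nd, best, ans) j = (nd, best, ans + best) := by
        simp [bBody, hdiff, hnd1, hng]
      rw [hbb]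
      have hall : ∀ k : Int, i < k → k ≤ j - 1 →
          PySem.List.pyGet? cs k = PySem.List.pyGet? cs i := by
        rcases hnd with ⟨_, hall⟩ | ⟨hgt, _, _, _⟩
        · exact hall
        · exact absurd hgt (by omega)
      obtain ⟨_, hb, hw⟩ := hms
      refine ⟨?_, ⟨h0, ?_, ?_⟩, rfl⟩
      · left
        refine ⟨hnd1, fun k hk1 hk2 => ?_⟩
        by_cases hkj : k = j
        · subst hkj
          exact hdiff
        · exact hall k hk1 (by omega)
      · intro p q hp hpq hq hne
        by_cases hqj : q = j
        · subst hqj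
          exfalso
          by_cases hpi : p = i
          · subst hpi
            exact hne hdiff.symm
          · exact hne ((hall p (by omega) (by omega)).trans hdiff.symm)
        · exact hb p q hp hpq (by omega) hne
      · rcases hw with h | ⟨p, q, hp, hpq, hq, hne, hm⟩
        · exact Or.inl h
        · exact Or.inr ⟨p, q, hp, hpq, by omega, hne, hm⟩
    · -- equal char at j, nd already set
      rcases hnd with ⟨he, _⟩ | ⟨hgt, hle, hnene, hall⟩
      · exact absurd he hnd1
      have hbb : bBody cs i (nd, best, ans) j =
          (nd, if j - nd > best then j - nd else best,
            ans + if j - nd > best then j - nd else best) := by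
        simp [bBody, hdiff, hnd1]
      rw [hbb]
      refine ⟨Or.inr ⟨hgt, by omega, hnene, hall⟩, ?_, rfl⟩
      refine MS_step cs i j best (j - nd) hij hms ?_ ?_
      · intro p hp hpj hpne
        have hpnd : nd ≤ p := by
          by_contra hc
          push Not at hc
          by_cases hpi : p = i
          · subst hpi
            exact hpne hdiff.symm
          · exact hpne ((hall p (by omega) hc).trans hdiff.symm)
        omega
      · exact Or.inr ⟨nd, by omega, by omega, fun h => hnene (h.trans hdiff), rfl⟩
  · -- differing char at j
    have hne' : PySem.List.pyGet? cs i ≠ PySem.List.pyGet? cs j := fun h => hdiff h.symm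
    have hub : ∀ p : Int, i ≤ p → p < j →
        PySem.List.pyGet? cs p ≠ PySem.List.pyGet? cs j → j - p ≤ j - i := by
      intro p hp _ _
      omega
    have hwit : j - i ≤ best ∨ ∃ p : Int, i ≤ p ∧ p < j ∧
        PySem.List.pyGet? cs p ≠ PySem.List.pyGet? cs j ∧ j - i = j - p :=
      Or.inr ⟨i, le_refl i, hij, hne', rfl⟩
    by_cases hnd1 : nd = -1
    · have hbb : bBody cs i (nd, best, ans) j =
          (j, if j - i > best then j - i else best,
            ans + if j - i > best then j - i else best) := by
        simp [bBody, hdiff, hnd1]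
      rw [hbb]
      refine ⟨?_, MS_step cs i j best (j - i) hij hms hub hwit, rfl⟩
      right
      refine ⟨hij, le_refl j, hdiff, ?_⟩
      rcases hnd with ⟨_, hall⟩ | ⟨hgt, _, _, _⟩
      · exact fun k hk1 hk2 => hall k hk1 (by omega)
      · exact absurd hgt (by omega)
    · rcases hnd with ⟨he, _⟩ | ⟨hgt, hle, hnene, hall⟩
      · exact absurd he hnd1
      have hbb : bBody cs i (nd, best, ans) j =
          (nd, if j - i > best then j - i else best,
            ans + if j - i > best then j - i else best) := by
        simp [bBody, hdiff, hnd1]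
      rw [hbb]
      exact ⟨Or.inr ⟨hgt, by omega, hnene, hall⟩,
        MS_step cs i j best (j - i) hij hms hub hwit, rfl⟩

theorem inner_eq (cs : List Char) (i : Int) (hi : 0 ≤ i) :
    ∀ (d : Nat) (j0 : Int), ((cs.length : Int) - j0).toNat = d → i < j0 →
    ∀ nd best ans, NdInv cs i (j0 - 1) nd → MS cs i (j0 - 1) best →
    ((PySem.List.pyRange j0 (cs.length : Int) 1).foldl (bBody cs i) (nd, best, ans)).2.2 =
      (PySem.List.pyRange j0 (cs.length : Int) 1).foldl (fun a j => a + Aval cs i j) ans := by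
  intro d
  induction d with
  | zero =>
    intro j0 hd hij nd best ans hnd hms
    have hle : (cs.length : Int) ≤ j0 := by omega
    rw [PySem.List.pyRange_one_eq_nil hle]
    simp
  | succ d ihd =>
    intro j0 hd hij nd best ans hnd hms
    have hj0n : j0 < (cs.length : Int) := by omega
    rw [PySem.List.pyRange_one_cons hj0n]
    simp only [List.foldl_cons]
    obtain ⟨hnd', hms', hans⟩ := bBody_spec cs i j0 nd best ans hi hij hnd hms
    have hbestA : (bBody cs i (nd, best, ans) j0).2.1 = Aval cs i j0 :=
      MS_unique hms' (Aval_MS cs i j0 hi (le_of_lt hij) hj0n)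
    have hst : bBody cs i (nd, best, ans) j0 =
        ((bBody cs i (nd, best, ans) j0).1, Aval cs i j0, ans + Aval cs i j0) := by
      rw [← hbestA, ← hans]
    rw [hst]
    have e : j0 + 1 - 1 = j0 := by ring
    have hnd2 : NdInv cs i (j0 + 1 - 1) (bBody cs i (nd, best, ans) j0).1 := by
      rw [e]; exact hnd'
    have hms2 : MS cs i (j0 + 1 - 1) (Aval cs i j0) := by
      rw [e]; exact hbestA ▸ hms'
    exact ihd (j0 + 1) (by omega) (by omega) _ (Aval cs i j0) _ hnd2 hms2

theorem outer_body_eq (cs : List Char) (i : Int) (hi : 0 ≤ i) (hin : i < (cs.length : Int))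
    (ans : Int) :
    (PySem.List.pyRange i (cs.length : Int) 1).foldl (fun answer j =>
        let word := PySem.List.slice cs (some i) (some (j + 1))
        let wLen : Int := (word.length : Int)
        answer + aWhile word wLen wLen.toNat 0 0) ans =
      ((PySem.List.pyRange (i + 1) (cs.length : Int) 1).foldl (bBody cs i) (-1, 0, ans)).2.2 := by
  show (PySem.List.pyRange i (cs.length : Int) 1).foldl (fun a j => a + Aval cs i j) ans = _
  have hAvalii : Aval cs i i = 0 := by
    refine MS_unique (Aval_MS cs i i hi (le_refl i) hin) ?_
    refine ⟨le_refl 0, ?_, Or.inl rfl⟩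
    intro p q hp hpq hq hne
    omega
  rw [PySem.List.pyRange_one_cons hin, List.foldl_cons, hAvalii, add_zero]
  have e : i + 1 - 1 = i := by ring
  have hnd0 : NdInv cs i (i + 1 - 1) (-1) := by
    rw [e]
    left
    exact ⟨rfl, fun k hk1 hk2 => absurd hk1 (by omega)⟩
  have hms0 : MS cs i (i + 1 - 1) 0 := by
    rw [e]
    refine ⟨le_refl 0, ?_, Or.inl rfl⟩
    intro p q hp hpq hq hne
    omega
  exact (inner_eq cs i hi ((cs.length : Int) - (i + 1)).toNat (i + 1) rfl (by omega)
    (-1) 0 ans hnd0 hms0).symm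

-- ===== VERDICT (by name: the statement is the Claim_ definition above) =====
theorem solution_spec : Claim_equal_solution := by
  intro s _hdom
  show solution s = solution_alt s
  simp only [solution, solution_alt]
  apply PySem.List.foldl_congr_mem
  intro ans i hi
  rw [PySem.List.mem_pyRange_one] at hi
  exact outer_body_eq s.toList i hi.1 hi.2 ans
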